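-- pv_equiv track=rewrite | github.com/LeoOMaia/rov-inference | code/process_traceroute_v1.py | classification_list
-- ===== SOURCE A (Python) =====
-- def classification_list(classification, city):
--     drop_invalid, ignore_roa, prefer_valid, protected = [], [], [], []
--
--     for asn in classification[city]:
--         if classification[city][asn] == "drop-invalid":
--             drop_invalid.append(asn)
--         elif classification[city][asn] == "ignore-roa":
--             ignore_roa.append(asn)
--         elif classification[city][asn] == "prefer-valid":
--             prefer_valid.append(asn)
--         elif classification[city][asn] == "unknown-protected":
--             protected.append(asn)
--     return drop_invalid, ignore_roa, prefer_valid, protected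
-- ===== SOURCE B (Python) =====
-- def classification_list(classification, city):
--     d = classification[city]
--     return ([asn for asn in d if d[asn] == "drop-invalid"],
--             [asn for asn in d if d[asn] == "ignore-roa"],
--             [asn for asn in d if d[asn] == "prefer-valid"],
--             [asn for asn in d if d[asn] == "unknown-protected"])
-- ===== Notes on version B (the rewrite author's own statement) =====
-- stated objective: simpler
-- what changed: Replaces the single four-way branching loop with four independent filtering passes (list comprehensions) over the city's table, one per classification label.
import Mathlib
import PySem

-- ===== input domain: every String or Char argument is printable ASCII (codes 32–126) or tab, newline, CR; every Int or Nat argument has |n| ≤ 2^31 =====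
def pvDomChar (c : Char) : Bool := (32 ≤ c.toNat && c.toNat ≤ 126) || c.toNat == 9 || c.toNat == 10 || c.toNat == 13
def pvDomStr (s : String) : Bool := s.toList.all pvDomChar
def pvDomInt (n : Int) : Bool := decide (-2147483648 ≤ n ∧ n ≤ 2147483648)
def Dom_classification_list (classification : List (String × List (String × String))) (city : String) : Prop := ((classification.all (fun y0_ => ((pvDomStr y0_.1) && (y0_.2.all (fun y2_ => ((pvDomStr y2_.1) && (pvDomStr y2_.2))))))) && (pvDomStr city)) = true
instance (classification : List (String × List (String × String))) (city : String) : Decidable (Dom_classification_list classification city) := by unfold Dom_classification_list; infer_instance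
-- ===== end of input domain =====

-- ===== PORT A =====
-- B binds the city's table once and makes four independent filtering passes, one per label (objective: simpler decomposition).
-- Equivalence is about return values; A raises KeyError on a missing city (excluded by Pre_).
def pvStep (d : List (String × String)) (s : List String × List String × List String × List String) (asn : String) : List String × List String × List String × List String :=
  let v := (d.lookup asn).getD ""
  if v == "drop-invalid" then (s.1 ++ [asn], s.2.1, s.2.2.1, s.2.2.2)
  else if v == "ignore-roa" then (s.1, s.2.1 ++ [asn], s.2.2.1, s.2.2.2)
  else if v == "prefer-valid" then (s.1, s.2.1, s.2.2.1 ++ [asn], s.2.2.2)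
  else if v == "unknown-protected" then (s.1, s.2.1, s.2.2.1, s.2.2.2 ++ [asn])
  else s

def classification_list (classification : List (String × List (String × String))) (city : String) : List String × List String × List String × List String :=
  match classification.lookup city with
  | none => ([], [], [], [])   -- unreachable under Pre_: Python raises KeyError here
  | some d => (d.map (·.1)).foldl (pvStep d) ([], [], [], [])

-- ===== PORT B =====
def classification_list_alt (classification : List (String × List (String × String))) (city : String) : List String × List String × List String × List String :=
  match classification.lookup city with
  | none => ([], [], [], [])   -- unreachable under Pre_: Python raises KeyError here
  | some d =>
    let keys := d.map (·.1)
    (keys.filter (fun a => (d.lookup a).getD "" == "drop-invalid"),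
     keys.filter (fun a => (d.lookup a).getD "" == "ignore-roa"),
     keys.filter (fun a => (d.lookup a).getD "" == "prefer-valid"),
     keys.filter (fun a => (d.lookup a).getD "" == "unknown-protected"))

-- ===== PRECONDITION & SPEC =====
-- Pre_ excludes exactly the inputs where A raises KeyError: city is not a key of classification.
def Pre_classification_list (classification : List (String × List (String × String))) (city : String) : Prop :=
  (classification.lookup city).isSome

instance (classification : List (String × List (String × String))) (city : String) : Decidable (Pre_classification_list classification city) := by unfold Pre_classification_list; infer_instance

def pvWitness_classification_list : (List (String × List (String × String))) × String :=
  ([("c", [("1", "drop-invalid"), ("2", "ignore-roa"), ("3", "other")])], "c")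

def Spec_classification_list (classification : List (String × List (String × String))) (city : String) (out : List String × List String × List String × List String) : Prop := out = classification_list_alt classification city
instance (classification : List (String × List (String × String))) (city : String) (out : List String × List String × List String × List String) : Decidable (Spec_classification_list classification city out) := by unfold Spec_classification_list; infer_instance

-- ===== CLAIM (what is proved, stated in full; the proofs are below) =====
def Claim_equal_classification_list : Prop := ∀ (classification : List (String × List (String × String))) (city : String), Dom_classification_list classification city → Pre_classification_list classification city → Spec_classification_list classification city (classification_list classification city)

-- ===== LEMMAS AND PROOFS =====
lemma pvLoop_eq (d : List (String × String)) (keys : List String)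
    (a b c e : List String) :
    keys.foldl (pvStep d) (a, b, c, e) =
      (a ++ keys.filter (fun x => (d.lookup x).getD "" == "drop-invalid"),
       b ++ keys.filter (fun x => (d.lookup x).getD "" == "ignore-roa"),
       c ++ keys.filter (fun x => (d.lookup x).getD "" == "prefer-valid"),
       e ++ keys.filter (fun x => (d.lookup x).getD "" == "unknown-protected")) := by
  induction keys generalizing a b c e with
  | nil => simp
  | cons k ks ih =>
    rw [List.foldl_cons]
    by_cases h1 : (d.lookup k).getD "" = "drop-invalid"
    · rw [show pvStep d (a, b, c, e) k = (a ++ [k], b, c, e) by simp [pvStep, h1], ih]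
      simp [h1]
    · by_cases h2 : (d.lookup k).getD "" = "ignore-roa"
      · rw [show pvStep d (a, b, c, e) k = (a, b ++ [k], c, e) by simp [pvStep, h2], ih]
        simp [h2]
      · by_cases h3 : (d.lookup k).getD "" = "prefer-valid"
        · rw [show pvStep d (a, b, c, e) k = (a, b, c ++ [k], e) by simp [pvStep, h3], ih]
          simp [h3]
        · by_cases h4 : (d.lookup k).getD "" = "unknown-protected"
          · rw [show pvStep d (a, b, c, e) k = (a, b, c, e ++ [k]) by simp [pvStep, h4], ih]
            simp [h4]
          · rw [show pvStep d (a, b, c, e) k = (a, b, c, e) by simp [pvStep, h1, h2, h3, h4], ih]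
            simp [h1, h2, h3, h4]

-- ===== VERDICT (by name: the statement is the Claim_ definition above) =====
theorem classification_list_spec : Claim_equal_classification_list := by
  intro classification city _ _
  unfold Spec_classification_list classification_list classification_list_alt
  cases h : classification.lookup city with
  | none => rfl
  | some d => simp [pvLoop_eq]
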